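-- pv_equiv track=rewrite | github.com/coco-in-bluemoon/baekjoon-online-judge | CLASS 1/8958: OX 퀴즈/solution.py | solution
-- ===== SOURCE A (Python) =====
-- def solution(ox_mark):
--     total_score = 0
--     score = 1
--
--     for mark in ox_mark:
--         if mark == 'O':
--             total_score += score
--             score += 1
--         else:
--             score = 1
--
--     return total_score
-- ===== SOURCE B (Python) =====
-- def solution(ox_mark):
--     total = 0
--     i = 0
--     length = len(ox_mark)
--     while i < length:
--         j = i
--         while j < length and ox_mark[j] == ox_mark[i]:
--             j += 1
--         if ox_mark[i] == 'O':
--             n = j - i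
--             total += n * (n + 1) // 2
--         i = j
--     return total
-- ===== Notes on version B (the rewrite author's own statement) =====
-- stated objective: alternative
-- what changed: Replaces the per-character running-score accumulator with a scan over maximal runs of equal marks, adding the closed-form triangular number n*(n+1)//2 for each run of 'O's.
import Mathlib
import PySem

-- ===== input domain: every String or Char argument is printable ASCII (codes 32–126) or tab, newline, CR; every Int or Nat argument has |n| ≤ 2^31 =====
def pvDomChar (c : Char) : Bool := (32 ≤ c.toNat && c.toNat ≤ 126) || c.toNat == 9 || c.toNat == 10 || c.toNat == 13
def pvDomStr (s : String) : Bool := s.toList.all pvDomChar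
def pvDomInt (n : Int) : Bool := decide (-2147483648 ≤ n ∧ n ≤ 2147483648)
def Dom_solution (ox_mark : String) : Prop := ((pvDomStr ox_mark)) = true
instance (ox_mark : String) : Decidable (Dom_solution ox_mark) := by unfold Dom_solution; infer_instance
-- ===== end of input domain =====

-- B replaces A's per-character running-score accumulator with a scan over maximal
-- runs of equal marks, adding the closed-form triangular number n*(n+1)//2 per 'O' run.

-- ===== PORT A =====
-- A: fold over the characters carrying (total_score, score).
def solution (ox_mark : String) : Int :=
  (ox_mark.toList.foldl
    (fun (st : Int × Int) mark =>
      if mark = 'O' then (st.1 + st.2, st.2 + 1) else (st.1, 1))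
    (0, 1)).1

-- ===== PORT B =====
-- B: the inner 'while' advancing j is the run's takeWhile; 'i = j' is the dropWhile.
def altSum : List Char → Int
  | [] => 0
  | c :: rest =>
      let n : Int := 1 + ((rest.takeWhile (fun x => x == c)).length : Int)
      (if c = 'O' then PySem.Int.floordiv (n * (n + 1)) 2 else 0)
        + altSum (rest.dropWhile (fun x => x == c))
termination_by l => l.length
decreasing_by
  simp only [List.length_cons]
  exact Nat.lt_succ_of_le (List.length_dropWhile_le _ _)

def solution_alt (ox_mark : String) : Int := altSum ox_mark.toList

-- ===== PRECONDITION & SPEC =====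
def Spec_solution (ox_mark : String) (out : Int) : Prop := out = solution_alt ox_mark
instance (ox_mark : String) (out : Int) : Decidable (Spec_solution ox_mark out) := by unfold Spec_solution; infer_instance

-- ===== CLAIM (what is proved, stated in full; the proofs are below) =====
def Claim_equal_solution : Prop := ∀ (ox_mark : String), Dom_solution ox_mark → Spec_solution ox_mark (solution ox_mark)

-- ===== LEMMAS AND PROOFS =====

-- F s l: the total A adds over l starting with running score s.
def F (s : Int) : List Char → Int
  | [] => 0
  | c :: l => if c = 'O' then s + F (s + 1) l else F 1 l

theorem foldl_eq_F (l : List Char) (t s : Int) :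
    (l.foldl (fun (st : Int × Int) mark =>
        if mark = 'O' then (st.1 + st.2, st.2 + 1) else (st.1, 1)) (t, s)).1
      = t + F s l := by
  induction l generalizing t s with
  | nil => simp [F]
  | cons c l ih =>
    by_cases h : c = 'O' <;> simp [F, h, ih, add_assoc]

-- Tri s n = s + (s+1) + … + (s+n-1)
def Tri (s : Int) : Nat → Int
  | 0 => 0
  | n + 1 => s + Tri (s + 1) n

theorem Tri_snoc (n : Nat) (s : Int) : Tri s (n + 1) = Tri s n + (s + n) := by
  induction n generalizing s with
  | zero => simp [Tri]
  | succ n ih =>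
    show s + Tri (s + 1) (n + 1) = (s + Tri (s + 1) n) + (s + (n + 1))
    rw [ih (s + 1)]
    ring

theorem Tri_one (n : Nat) :
    Tri 1 n = PySem.Int.floordiv ((n : Int) * ((n : Int) + 1)) 2 := by
  induction n with
  | zero => simp [Tri, PySem.Int.floordiv]
  | succ n ih =>
    rw [Tri_snoc, ih]
    rw [PySem.Int.floordiv_eq_ediv_of_pos (by omega),
        PySem.Int.floordiv_eq_ediv_of_pos (by omega)]
    obtain ⟨r, hr⟩ := Int.even_mul_succ_self (n : Int)
    have h2 : ((n : Int) + 1) * (((n : Int) + 1) + 1) = r + r + 2 * ((n : Int) + 1) := by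
      rw [← hr]; ring
    push_cast
    rw [hr, h2]
    omega

-- F over a run of n 'O's.
theorem F_replicate_O (n : Nat) (s : Int) (rest : List Char) :
    F s (List.replicate n 'O' ++ rest) = Tri s n + F (s + n) rest := by
  induction n generalizing s with
  | zero => simp [Tri]
  | succ n ih =>
    simp only [List.replicate_succ, List.cons_append, F, ih (s + 1), Tri]
    push_cast
    ring_nf

theorem F_reset (s : Int) (rest : List Char) (h : rest.head? ≠ some 'O') :
    F s rest = F 1 rest := by
  cases rest with
  | nil => rfl
  | cons c l =>
    have hc : c ≠ 'O' := by simpa using h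
    simp [F, hc]

theorem F_skip_nonO (l rest : List Char) (h : ∀ x ∈ l, x ≠ 'O') :
    F 1 (l ++ rest) = F 1 rest := by
  induction l with
  | nil => rfl
  | cons c l ih =>
    have hc : c ≠ 'O' := h c (List.mem_cons_self ..)
    simp only [List.cons_append, F, if_neg hc]
    exact ih (fun x hx => h x (List.mem_cons_of_mem _ hx))

theorem head?_dropWhile_ne (c : Char) (l : List Char) :
    (l.dropWhile (fun x => x == c)).head? ≠ some c := by
  intro h
  have := List.head?_dropWhile_not (fun x => x == c) l
  rw [h] at this
  simp at this

theorem F_eq_altSum (l : List Char) : F 1 l = altSum l := by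
  induction hn : l.length using Nat.strong_induction_on generalizing l with
  | _ n ih =>
  cases l with
  | nil => simp [F, altSum]
  | cons c rest =>
    have htw : rest.takeWhile (fun x => x == c)
        = List.replicate (rest.takeWhile (fun x => x == c)).length c := by
      apply List.eq_replicate_length.mpr
      intro x hx
      simpa using List.mem_takeWhile_imp hx
    have hdecomp : List.replicate (1 + (rest.takeWhile (fun x => x == c)).length) c
          ++ rest.dropWhile (fun x => x == c) = c :: rest := by
      rw [Nat.add_comm, List.replicate_succ, ← htw, List.cons_append,
          List.takeWhile_append_dropWhile]
    have hlt : (rest.dropWhile (fun x => x == c)).length < n := by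
      subst hn
      simp only [List.length_cons]
      exact Nat.lt_succ_of_le (List.length_dropWhile_le _ _)
    have hih := ih _ hlt (rest.dropWhile (fun x => x == c)) rfl
    by_cases hc : c = 'O'
    · subst hc
      conv_lhs => rw [← hdecomp]
      rw [F_replicate_O,
          F_reset _ _ (head?_dropWhile_ne 'O' rest), hih, Tri_one]
      simp only [altSum, if_true]
      push_cast
      ring_nf
    · have hrest : F 1 (c :: rest) = F 1 rest := by
        simp only [F, if_neg hc]
      rw [hrest,
          ← List.takeWhile_append_dropWhile (p := fun x => x == c) (l := rest),
          F_skip_nonO _ _ (fun x hx => by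
            have hxc := List.mem_takeWhile_imp hx
            simp only [beq_iff_eq] at hxc
            exact hxc ▸ hc),
          hih]
      simp [altSum, hc]

-- ===== VERDICT (by name: the statement is the Claim_ definition above) =====
theorem solution_spec : Claim_equal_solution := by
  intro ox_mark _
  show solution ox_mark = solution_alt ox_mark
  unfold solution solution_alt
  rw [foldl_eq_F, F_eq_altSum, zero_add]
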